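-- pv_equiv track=rewrite | github.com/lucasschnugger/02633-nicole-exam | Exam solutions/2021-maj/count_peaks.py | count_peaks
-- ===== SOURCE A (Python) =====
-- def count_peaks(A):
--     c = 0
--     for n in range(len(A)):
--         for v in range(len(A[0])):
--             number = A[n][v]
--
--             hasPeak = False
--             if n > 0:
--                 up = A[n-1][v]
--                 hasPeak = hasPeak or (number > up and abs(number-up) >= 2)
--             if n < len(A)-1:
--                 down = A[n+1][v]
--                 hasPeak = hasPeak or (number > down and abs(number - down) >= 2)
--             if v > 0:
--                 left = A[n][v-1]
--                 hasPeak = hasPeak or (number > left and abs(number - left) >= 2)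
--             if v < len(A[0])-1:
--                 right = A[n][v+1]
--                 hasPeak = hasPeak or (number > right and abs(number - right) >= 2)
--
--             if hasPeak:
--                 c = c + 1
--     return c
-- ===== SOURCE B (Python) =====
-- def count_peaks(A):
--     if not A:
--         return 0
--     w = len(A[0])
--     peaks = set()
--     # horizontal edges
--     for n in range(len(A)):
--         row = A[n]
--         for v in range(w - 1):
--             if row[v] - row[v + 1] >= 2:
--                 peaks.add((n, v))
--             elif row[v + 1] - row[v] >= 2:
--                 peaks.add((n, v + 1))
--     # vertical edges
--     for n in range(len(A) - 1):
--         for v in range(w):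
--             if A[n][v] - A[n + 1][v] >= 2:
--                 peaks.add((n, v))
--             elif A[n + 1][v] - A[n][v] >= 2:
--                 peaks.add((n + 1, v))
--     return len(peaks)
-- ===== Notes on version B (the rewrite author's own statement) =====
-- stated objective: alternative
-- what changed: Instead of scanning each cell's up/down/left/right neighbor fan and counting flagged cells, B walks every horizontal and vertical adjacency edge once, adds the strictly-larger endpoint (difference >= 2) of each edge to a set of peak coordinates, and returns the set's size.
import Mathlib
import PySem

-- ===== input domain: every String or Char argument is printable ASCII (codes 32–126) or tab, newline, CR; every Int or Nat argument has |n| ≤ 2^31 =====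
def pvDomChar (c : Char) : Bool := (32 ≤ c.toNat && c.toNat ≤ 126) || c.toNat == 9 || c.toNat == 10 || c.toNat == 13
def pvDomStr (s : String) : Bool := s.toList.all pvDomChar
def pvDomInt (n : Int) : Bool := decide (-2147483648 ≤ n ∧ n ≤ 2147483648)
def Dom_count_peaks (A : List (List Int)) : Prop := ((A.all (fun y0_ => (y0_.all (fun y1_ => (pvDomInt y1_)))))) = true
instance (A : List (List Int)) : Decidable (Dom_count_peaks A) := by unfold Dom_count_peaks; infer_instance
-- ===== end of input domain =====

-- B replaces A's per-cell neighbor-fan count by a single scan over the grid's horizontal and vertical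
-- adjacency edges that collects the strictly-larger endpoint (difference ≥ 2) of each edge into a set
-- of peak coordinates and returns the set's size (objective: alternative decomposition, same cost).

-- ===== PORT A =====
def count_peaks (A : List (List Int)) : Int :=
  (PySem.List.pyRange 0 (A.length : Int) 1).foldl (fun c n =>
    (PySem.List.pyRange 0 ((PySem.List.pyGetD A 0 []).length : Int) 1).foldl (fun c v =>
      let number := PySem.List.pyGetD (PySem.List.pyGetD A n []) v 0
      let hasPeak := false
      let hasPeak := if 0 < n then
          let up := PySem.List.pyGetD (PySem.List.pyGetD A (n-1) []) v 0
          hasPeak || (decide (number > up) && decide (2 ≤ |number - up|))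
        else hasPeak
      let hasPeak := if n < (A.length : Int) - 1 then
          let down := PySem.List.pyGetD (PySem.List.pyGetD A (n+1) []) v 0
          hasPeak || (decide (number > down) && decide (2 ≤ |number - down|))
        else hasPeak
      let hasPeak := if 0 < v then
          let left := PySem.List.pyGetD (PySem.List.pyGetD A n []) (v-1) 0
          hasPeak || (decide (number > left) && decide (2 ≤ |number - left|))
        else hasPeak
      let hasPeak := if v < ((PySem.List.pyGetD A 0 []).length : Int) - 1 then
          let right := PySem.List.pyGetD (PySem.List.pyGetD A n []) (v+1) 0
          hasPeak || (decide (number > right) && decide (2 ≤ |number - right|))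
        else hasPeak
      if hasPeak then c + 1 else c) c) 0

-- ===== PORT B =====
def count_peaks_alt (A : List (List Int)) : Int :=
  if A = [] then 0 else
  let w : Int := ((PySem.List.pyGetD A 0 []).length : Int)
  let peaks : PySem.Set (Int × Int) := PySem.Set.empty
  -- horizontal edges
  let peaks := (PySem.List.pyRange 0 (A.length : Int) 1).foldl (fun s n =>
    let row := PySem.List.pyGetD A n []
    (PySem.List.pyRange 0 (w - 1) 1).foldl (fun s v =>
      if 2 ≤ PySem.List.pyGetD row v 0 - PySem.List.pyGetD row (v+1) 0 then
        PySem.Set.add s (n, v)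
      else if 2 ≤ PySem.List.pyGetD row (v+1) 0 - PySem.List.pyGetD row v 0 then
        PySem.Set.add s (n, v+1)
      else s) s) peaks
  -- vertical edges
  let peaks := (PySem.List.pyRange 0 ((A.length : Int) - 1) 1).foldl (fun s n =>
    (PySem.List.pyRange 0 w 1).foldl (fun s v =>
      if 2 ≤ PySem.List.pyGetD (PySem.List.pyGetD A n []) v 0
             - PySem.List.pyGetD (PySem.List.pyGetD A (n+1) []) v 0 then
        PySem.Set.add s (n, v)
      else if 2 ≤ PySem.List.pyGetD (PySem.List.pyGetD A (n+1) []) v 0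
                  - PySem.List.pyGetD (PySem.List.pyGetD A n []) v 0 then
        PySem.Set.add s (n+1, v)
      else s) s) peaks
  PySem.Set.len peaks

-- ===== PRECONDITION & SPEC =====
-- Pre_ excludes exactly the ragged grids on which Python A raises IndexError: a row shorter than the
-- first row (A indexes every row at all columns of row 0).
def Pre_count_peaks (A : List (List Int)) : Prop :=
  ∀ row ∈ A, (A.headD []).length ≤ row.length
instance (A : List (List Int)) : Decidable (Pre_count_peaks A) := by unfold Pre_count_peaks; infer_instance
def pvWitness_count_peaks : List (List Int) := [[0, 3], [1, 1]]
def Spec_count_peaks (A : List (List Int)) (out : Int) : Prop := out = count_peaks_alt A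
instance (A : List (List Int)) (out : Int) : Decidable (Spec_count_peaks A out) := by unfold Spec_count_peaks; infer_instance

-- ===== CLAIM (what is proved, stated in full; the proofs are below) =====
def Claim_equal_count_peaks : Prop := ∀ (A : List (List Int)), Dom_count_peaks A → Pre_count_peaks A → Spec_count_peaks A (count_peaks A)

-- ===== LEMMAS AND PROOFS =====

-- cell value A[n][v] (total form used by both ports), grid height and width of row 0
def pvG (A : List (List Int)) (n v : Int) : Int :=
  PySem.List.pyGetD (PySem.List.pyGetD A n []) v 0
def pvH (A : List (List Int)) : Int := (A.length : Int)
def pvW (A : List (List Int)) : Int := ((PySem.List.pyGetD A 0 []).length : Int)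

-- A's per-cell peak test as a single Bool
def pvPeakb (A : List (List Int)) (n v : Int) : Bool :=
  decide ((0 < n ∧ (pvG A (n-1) v < pvG A n v ∧ 2 ≤ |pvG A n v - pvG A (n-1) v|)) ∨
          (n < pvH A - 1 ∧ (pvG A (n+1) v < pvG A n v ∧ 2 ≤ |pvG A n v - pvG A (n+1) v|)) ∨
          (0 < v ∧ (pvG A n (v-1) < pvG A n v ∧ 2 ≤ |pvG A n v - pvG A n (v-1)|)) ∨
          (v < pvW A - 1 ∧ (pvG A n (v+1) < pvG A n v ∧ 2 ≤ |pvG A n v - pvG A n (v+1)|)))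

lemma pv_gt_abs_iff (a b : Int) : (b < a ∧ 2 ≤ |a - b|) ↔ 2 ≤ a - b := by
  constructor
  · rintro ⟨h1, h2⟩
    rwa [abs_of_pos (by omega)] at h2
  · intro h
    exact ⟨by omega, by rw [abs_of_pos (by omega)]; omega⟩

lemma pvPeakb_iff (A : List (List Int)) (n v : Int) :
    pvPeakb A n v = true ↔
      ((0 < n ∧ 2 ≤ pvG A n v - pvG A (n-1) v) ∨
       (n < pvH A - 1 ∧ 2 ≤ pvG A n v - pvG A (n+1) v) ∨
       (0 < v ∧ 2 ≤ pvG A n v - pvG A n (v-1)) ∨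
       (v < pvW A - 1 ∧ 2 ≤ pvG A n v - pvG A n (v+1))) := by
  unfold pvPeakb
  rw [decide_eq_true_eq, pv_gt_abs_iff, pv_gt_abs_iff, pv_gt_abs_iff, pv_gt_abs_iff]

-- A-side: sum/count bridging
lemma pv_sum_countP_product (l1 l2 : List Int) (p : Int → Int → Bool) :
    (l1.map (fun n => ((l2.countP (fun v => p n v) : Nat) : Int))).sum =
      (((l1 ×ˢ l2).countP (fun y => p y.1 y.2) : Nat) : Int) := by
  induction l1 with
  | nil => simp
  | cons a l ih =>
    simp only [List.map_cons, List.sum_cons, ih, List.product_cons, List.countP_append,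
      List.countP_map]
    have hc : ((fun (y : Int × Int) => p y.1 y.2) ∘ fun b => (a, b)) = fun v => p a v := rfl
    rw [hc]
    push_cast
    ring

set_option maxHeartbeats 1000000 in
lemma pv_countA (A : List (List Int)) :
    count_peaks A =
      (((PySem.List.pyRange 0 (pvH A) 1 ×ˢ PySem.List.pyRange 0 (pvW A) 1).countP
          (fun y => pvPeakb A y.1 y.2) : Nat) : Int) := by
  unfold count_peaks pvH pvW
  have hinner : ∀ (n : Int) (c : Int),
      (PySem.List.pyRange 0 ((PySem.List.pyGetD A 0 []).length : Int) 1).foldl (fun c v =>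
        let number := PySem.List.pyGetD (PySem.List.pyGetD A n []) v 0
        let hasPeak := false
        let hasPeak := if 0 < n then
            let up := PySem.List.pyGetD (PySem.List.pyGetD A (n-1) []) v 0
            hasPeak || (decide (number > up) && decide (2 ≤ |number - up|))
          else hasPeak
        let hasPeak := if n < (A.length : Int) - 1 then
            let down := PySem.List.pyGetD (PySem.List.pyGetD A (n+1) []) v 0
            hasPeak || (decide (number > down) && decide (2 ≤ |number - down|))
          else hasPeak
        let hasPeak := if 0 < v then
            let left := PySem.List.pyGetD (PySem.List.pyGetD A n []) (v-1) 0
            hasPeak || (decide (number > left) && decide (2 ≤ |number - left|))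
          else hasPeak
        let hasPeak := if v < ((PySem.List.pyGetD A 0 []).length : Int) - 1 then
            let right := PySem.List.pyGetD (PySem.List.pyGetD A n []) (v+1) 0
            hasPeak || (decide (number > right) && decide (2 ≤ |number - right|))
          else hasPeak
        if hasPeak then c + 1 else c) c
      = c + (((PySem.List.pyRange 0 ((PySem.List.pyGetD A 0 []).length : Int) 1).countP (fun v => pvPeakb A n v) : Nat) : Int) := by
    intro n c
    have hb : (fun (c : Int) (v : Int) =>
        let number := PySem.List.pyGetD (PySem.List.pyGetD A n []) v 0
        let hasPeak := false
        let hasPeak := if 0 < n then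
            let up := PySem.List.pyGetD (PySem.List.pyGetD A (n-1) []) v 0
            hasPeak || (decide (number > up) && decide (2 ≤ |number - up|))
          else hasPeak
        let hasPeak := if n < (A.length : Int) - 1 then
            let down := PySem.List.pyGetD (PySem.List.pyGetD A (n+1) []) v 0
            hasPeak || (decide (number > down) && decide (2 ≤ |number - down|))
          else hasPeak
        let hasPeak := if 0 < v then
            let left := PySem.List.pyGetD (PySem.List.pyGetD A n []) (v-1) 0
            hasPeak || (decide (number > left) && decide (2 ≤ |number - left|))
          else hasPeak
        let hasPeak := if v < ((PySem.List.pyGetD A 0 []).length : Int) - 1 then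
            let right := PySem.List.pyGetD (PySem.List.pyGetD A n []) (v+1) 0
            hasPeak || (decide (number > right) && decide (2 ≤ |number - right|))
          else hasPeak
        if hasPeak then c + 1 else c)
        = (fun c v => if pvPeakb A n v then c + 1 else c) := by
      funext c v
      refine if_congr ?_ rfl rfl
      simp only [pvPeakb, pvG, pvH, pvW, gt_iff_lt, decide_eq_true_eq]
      by_cases h1 : 0 < n <;> by_cases h2 : n < (A.length : Int) - 1 <;>
        by_cases h3 : 0 < v <;> by_cases h4 : v < ((PySem.List.pyGetD A 0 []).length : Int) - 1 <;>
        simp [h1, h2, h3, h4] <;> tauto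
    rw [hb, PySem.List.foldl_count_if]
  simp only [hinner]
  rw [PySem.List.foldl_add]
  rw [pv_sum_countP_product (PySem.List.pyRange 0 (A.length : Int) 1)
        (PySem.List.pyRange 0 ((PySem.List.pyGetD A 0 []).length : Int) 1) (pvPeakb A)]
  rw [zero_add]

-- generic fold invariant for set-building loops
lemma pv_foldl_set_inv {α β : Type} [BEq β] [LawfulBEq β]
    (step : PySem.Set β → α → PySem.Set β) (C : α → β → Prop)
    (hmem : ∀ s x y, y ∈ step s x ↔ y ∈ s ∨ C x y)
    (hnd : ∀ s x, s.Nodup → (step s x).Nodup) :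
    ∀ (l : List α) (s : PySem.Set β),
      (∀ y, y ∈ l.foldl step s ↔ y ∈ s ∨ ∃ x ∈ l, C x y) ∧
      (s.Nodup → (l.foldl step s).Nodup) := by
  intro l
  induction l with
  | nil => intro s; simp
  | cons a l ih =>
    intro s
    refine ⟨fun y => ?_, fun hs => (ih _).2 (hnd _ _ hs)⟩
    rw [List.foldl_cons, (ih _).1 y, hmem]
    simp only [List.mem_cons]
    constructor
    · rintro ((h | h) | ⟨x, hx, hC⟩)
      · exact Or.inl h
      · exact Or.inr ⟨a, Or.inl rfl, h⟩
      · exact Or.inr ⟨x, Or.inr hx, hC⟩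
    · rintro (h | ⟨x, (rfl | hx), hC⟩)
      · exact Or.inl (Or.inl h)
      · exact Or.inl (Or.inr hC)
      · exact Or.inr ⟨x, hx, hC⟩

-- the set built by B's two edge loops
def pvFold (A : List (List Int)) : PySem.Set (Int × Int) :=
  let peaks : PySem.Set (Int × Int) := PySem.Set.empty
  let peaks := (PySem.List.pyRange 0 (A.length : Int) 1).foldl (fun s n =>
    let row := PySem.List.pyGetD A n []
    (PySem.List.pyRange 0 (((PySem.List.pyGetD A 0 []).length : Int) - 1) 1).foldl (fun s v =>
      if 2 ≤ PySem.List.pyGetD row v 0 - PySem.List.pyGetD row (v+1) 0 then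
        PySem.Set.add s (n, v)
      else if 2 ≤ PySem.List.pyGetD row (v+1) 0 - PySem.List.pyGetD row v 0 then
        PySem.Set.add s (n, v+1)
      else s) s) peaks
  (PySem.List.pyRange 0 ((A.length : Int) - 1) 1).foldl (fun s n =>
    (PySem.List.pyRange 0 ((PySem.List.pyGetD A 0 []).length : Int) 1).foldl (fun s v =>
      if 2 ≤ PySem.List.pyGetD (PySem.List.pyGetD A n []) v 0
             - PySem.List.pyGetD (PySem.List.pyGetD A (n+1) []) v 0 then
        PySem.Set.add s (n, v)
      else if 2 ≤ PySem.List.pyGetD (PySem.List.pyGetD A (n+1) []) v 0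
                  - PySem.List.pyGetD (PySem.List.pyGetD A n []) v 0 then
        PySem.Set.add s (n+1, v)
      else s) s) peaks

lemma pv_alt_eq (A : List (List Int)) (h : A ≠ []) :
    count_peaks_alt A = PySem.Set.len (pvFold A) := by
  simp only [count_peaks_alt, pvFold, if_neg h]

-- the per-edge conditions recorded by B's horizontal / vertical loops
def pvCH (A : List (List Int)) (n : Int) (y : Int × Int) : Prop :=
  ∃ v, (0 ≤ v ∧ v < pvW A - 1) ∧
    ((2 ≤ pvG A n v - pvG A n (v+1) ∧ y = (n, v)) ∨
     (¬ (2 ≤ pvG A n v - pvG A n (v+1)) ∧ 2 ≤ pvG A n (v+1) - pvG A n v ∧ y = (n, v+1)))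

def pvCV (A : List (List Int)) (n : Int) (y : Int × Int) : Prop :=
  ∃ v, (0 ≤ v ∧ v < pvW A) ∧
    ((2 ≤ pvG A n v - pvG A (n+1) v ∧ y = (n, v)) ∨
     (¬ (2 ≤ pvG A n v - pvG A (n+1) v) ∧ 2 ≤ pvG A (n+1) v - pvG A n v ∧ y = (n+1, v)))

-- pvFold in terms of named step functions (definitionally the same computation)
def pvHStepI (A : List (List Int)) (n : Int) :
    PySem.Set (Int × Int) → Int → PySem.Set (Int × Int) := fun s v =>
  if 2 ≤ pvG A n v - pvG A n (v+1) then PySem.Set.add s (n, v)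
  else if 2 ≤ pvG A n (v+1) - pvG A n v then PySem.Set.add s (n, v+1)
  else s

def pvVStepI (A : List (List Int)) (n : Int) :
    PySem.Set (Int × Int) → Int → PySem.Set (Int × Int) := fun s v =>
  if 2 ≤ pvG A n v - pvG A (n+1) v then PySem.Set.add s (n, v)
  else if 2 ≤ pvG A (n+1) v - pvG A n v then PySem.Set.add s (n+1, v)
  else s

def pvFold2 (A : List (List Int)) : PySem.Set (Int × Int) :=
  (PySem.List.pyRange 0 (pvH A - 1) 1).foldl
    (fun s n => (PySem.List.pyRange 0 (pvW A) 1).foldl (pvVStepI A n) s)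
    ((PySem.List.pyRange 0 (pvH A) 1).foldl
      (fun s n => (PySem.List.pyRange 0 (pvW A - 1) 1).foldl (pvHStepI A n) s)
      PySem.Set.empty)

lemma pvFold_eq (A : List (List Int)) : pvFold A = pvFold2 A := rfl

lemma pv_hstep_mem (A : List (List Int)) (n : Int) (s : PySem.Set (Int × Int)) (v : Int)
    (y : Int × Int) :
    y ∈ pvHStepI A n s v ↔ y ∈ s ∨
      ((2 ≤ pvG A n v - pvG A n (v+1) ∧ y = (n, v)) ∨
       (¬ (2 ≤ pvG A n v - pvG A n (v+1)) ∧ 2 ≤ pvG A n (v+1) - pvG A n v ∧ y = (n, v+1))) := by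
  unfold pvHStepI
  split_ifs with h1 h2
  · simp only [PySem.Set.mem_add]; tauto
  · simp only [PySem.Set.mem_add]; tauto
  · tauto

lemma pv_vstep_mem (A : List (List Int)) (n : Int) (s : PySem.Set (Int × Int)) (v : Int)
    (y : Int × Int) :
    y ∈ pvVStepI A n s v ↔ y ∈ s ∨
      ((2 ≤ pvG A n v - pvG A (n+1) v ∧ y = (n, v)) ∨
       (¬ (2 ≤ pvG A n v - pvG A (n+1) v) ∧ 2 ≤ pvG A (n+1) v - pvG A n v ∧ y = (n+1, v))) := by
  unfold pvVStepI
  split_ifs with h1 h2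
  · simp only [PySem.Set.mem_add]; tauto
  · simp only [PySem.Set.mem_add]; tauto
  · tauto

lemma pv_hstep_nodup (A : List (List Int)) (n : Int) (s : PySem.Set (Int × Int)) (v : Int)
    (hs : s.Nodup) : (pvHStepI A n s v).Nodup := by
  unfold pvHStepI
  split_ifs
  · exact PySem.Set.nodup_add _ _ hs
  · exact PySem.Set.nodup_add _ _ hs
  · exact hs

lemma pv_vstep_nodup (A : List (List Int)) (n : Int) (s : PySem.Set (Int × Int)) (v : Int)
    (hs : s.Nodup) : (pvVStepI A n s v).Nodup := by
  unfold pvVStepI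
  split_ifs
  · exact PySem.Set.nodup_add _ _ hs
  · exact PySem.Set.nodup_add _ _ hs
  · exact hs

lemma pv_mem_pvFold (A : List (List Int)) :
    (∀ y, y ∈ pvFold A ↔
      ((∃ n, (0 ≤ n ∧ n < pvH A) ∧ pvCH A n y) ∨
       (∃ n, (0 ≤ n ∧ n < pvH A - 1) ∧ pvCV A n y))) ∧
    (pvFold A).Nodup := by
  rw [pvFold_eq]
  unfold pvFold2
  have hH := pv_foldl_set_inv
      (fun s n => (PySem.List.pyRange 0 (pvW A - 1) 1).foldl (pvHStepI A n) s)
      (pvCH A)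
      (by
        intro s n y
        have hi := pv_foldl_set_inv (pvHStepI A n) _
          (pv_hstep_mem A n) (pv_hstep_nodup A n)
          (PySem.List.pyRange 0 (pvW A - 1) 1) s
        dsimp only
        rw [hi.1 y]
        unfold pvCH
        simp only [PySem.List.mem_pyRange_one])
      (by
        intro s n hs
        have hi := pv_foldl_set_inv (pvHStepI A n) _
          (pv_hstep_mem A n) (pv_hstep_nodup A n)
          (PySem.List.pyRange 0 (pvW A - 1) 1) s
        exact hi.2 hs)
  have hV := pv_foldl_set_inv
      (fun s n => (PySem.List.pyRange 0 (pvW A) 1).foldl (pvVStepI A n) s)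
      (pvCV A)
      (by
        intro s n y
        have hi := pv_foldl_set_inv (pvVStepI A n) _
          (pv_vstep_mem A n) (pv_vstep_nodup A n)
          (PySem.List.pyRange 0 (pvW A) 1) s
        dsimp only
        rw [hi.1 y]
        unfold pvCV
        simp only [PySem.List.mem_pyRange_one])
      (by
        intro s n hs
        have hi := pv_foldl_set_inv (pvVStepI A n) _
          (pv_vstep_mem A n) (pv_vstep_nodup A n)
          (PySem.List.pyRange 0 (pvW A) 1) s
        exact hi.2 hs)
  have h1 := hH (PySem.List.pyRange 0 (pvH A) 1) PySem.Set.empty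
  have h2 := hV (PySem.List.pyRange 0 (pvH A - 1) 1)
      ((PySem.List.pyRange 0 (pvH A) 1).foldl
        (fun s n => (PySem.List.pyRange 0 (pvW A - 1) 1).foldl (pvHStepI A n) s)
        PySem.Set.empty)
  refine ⟨fun y => ?_, h2.2 (h1.2 List.nodup_nil)⟩
  rw [h2.1 y, h1.1 y]
  simp only [PySem.List.mem_pyRange_one, PySem.Set.empty, List.not_mem_nil, false_or]

-- the edge-scan conditions describe exactly the in-bounds peak cells
lemma pv_char (A : List (List Int)) (p q : Int) :
    ((∃ n, (0 ≤ n ∧ n < pvH A) ∧ pvCH A n (p, q)) ∨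
     (∃ n, (0 ≤ n ∧ n < pvH A - 1) ∧ pvCV A n (p, q))) ↔
      (0 ≤ p ∧ p < pvH A ∧ 0 ≤ q ∧ q < pvW A ∧ pvPeakb A p q = true) := by
  rw [pvPeakb_iff]
  constructor
  · rintro (⟨n, ⟨hn0, hnH⟩, v, ⟨hv0, hvW⟩, hc⟩ | ⟨n, ⟨hn0, hnH⟩, v, ⟨hv0, hvW⟩, hc⟩)
    · rcases hc with ⟨hd, heq⟩ | ⟨hnd, hd, heq⟩
      · obtain ⟨rfl, rfl⟩ : p = n ∧ q = v := by simpa [Prod.ext_iff] using heq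
        exact ⟨hn0, hnH, hv0, by omega, Or.inr (Or.inr (Or.inr ⟨hvW, hd⟩))⟩
      · obtain ⟨rfl, rfl⟩ : p = n ∧ q = v + 1 := by simpa [Prod.ext_iff] using heq
        refine ⟨hn0, hnH, by omega, by omega, Or.inr (Or.inr (Or.inl ⟨by omega, ?_⟩))⟩
        rwa [show (v : Int) + 1 - 1 = v by ring]
    · rcases hc with ⟨hd, heq⟩ | ⟨hnd, hd, heq⟩
      · obtain ⟨rfl, rfl⟩ : p = n ∧ q = v := by simpa [Prod.ext_iff] using heq
        exact ⟨hn0, by omega, hv0, hvW, Or.inr (Or.inl ⟨hnH, hd⟩)⟩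
      · obtain ⟨rfl, rfl⟩ : p = n + 1 ∧ q = v := by simpa [Prod.ext_iff] using heq
        refine ⟨by omega, by omega, hv0, hvW, Or.inl ⟨by omega, ?_⟩⟩
        rwa [show (n : Int) + 1 - 1 = n by ring]
  · rintro ⟨hp0, hpH, hq0, hqW, (⟨h0, hd⟩ | ⟨h0, hd⟩ | ⟨h0, hd⟩ | ⟨h0, hd⟩)⟩
    · -- up neighbor: recorded by the vertical loop at n = p - 1, second branch
      refine Or.inr ⟨p - 1, ⟨by omega, by omega⟩, q, ⟨hq0, hqW⟩, Or.inr ⟨?_, ?_, ?_⟩⟩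
      · rw [show (p : Int) - 1 + 1 = p by ring]; omega
      · rw [show (p : Int) - 1 + 1 = p by ring]; omega
      · simp
    · -- down neighbor: vertical loop at n = p, first branch
      exact Or.inr ⟨p, ⟨hp0, h0⟩, q, ⟨hq0, hqW⟩, Or.inl ⟨hd, rfl⟩⟩
    · -- left neighbor: horizontal loop at v = q - 1, second branch
      refine Or.inl ⟨p, ⟨hp0, hpH⟩, q - 1, ⟨by omega, by omega⟩, Or.inr ⟨?_, ?_, ?_⟩⟩
      · rw [show (q : Int) - 1 + 1 = q by ring]; omega
      · rw [show (q : Int) - 1 + 1 = q by ring]; omega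
      · simp
    · -- right neighbor: horizontal loop at v = q, first branch
      exact Or.inl ⟨p, ⟨hp0, hpH⟩, q, ⟨hq0, h0⟩, Or.inl ⟨hd, rfl⟩⟩

lemma pv_countB (A : List (List Int)) (h : A ≠ []) :
    count_peaks_alt A =
      (((PySem.List.pyRange 0 (pvH A) 1 ×ˢ PySem.List.pyRange 0 (pvW A) 1).countP
          (fun y => pvPeakb A y.1 y.2) : Nat) : Int) := by
  rw [pv_alt_eq A h]
  obtain ⟨hmem, hnd⟩ := pv_mem_pvFold A
  have hTnd : ((PySem.List.pyRange 0 (pvH A) 1 ×ˢ PySem.List.pyRange 0 (pvW A) 1).filter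
      (fun y => pvPeakb A y.1 y.2)).Nodup :=
    ((PySem.List.nodup_pyRange_one 0 (pvH A)).product
      (PySem.List.nodup_pyRange_one 0 (pvW A))).filter _
  have hperm : (pvFold A).Perm
      ((PySem.List.pyRange 0 (pvH A) 1 ×ˢ PySem.List.pyRange 0 (pvW A) 1).filter
        (fun y => pvPeakb A y.1 y.2)) := by
    rw [List.perm_ext_iff_of_nodup hnd hTnd]
    rintro ⟨p, q⟩
    rw [hmem (p, q), pv_char]
    simp only [List.mem_filter, List.mem_product, PySem.List.mem_pyRange_one]
    tauto
  have hlen := hperm.length_eq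
  rw [List.countP_eq_length_filter]
  show ((pvFold A).length : Int) = _
  rw [hlen]

-- ===== VERDICT (by name: the statement is the Claim_ definition above) =====
theorem count_peaks_spec : Claim_equal_count_peaks := by
  intro A _ _
  unfold Spec_count_peaks
  by_cases hA : A = []
  · subst hA; rfl
  · rw [pv_countA, pv_countB A hA]
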